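-- pv_equiv track=rewrite | github.com/MrBrantCode/unitest_baseline | mut_generate/mist_train_taco/taco_7665/solution.py | count_wrong_placed_balls
-- ===== SOURCE A (Python) =====
-- def count_wrong_placed_balls(s: str) -> int:
--     count = 0
--     for i in range(len(s)):
--         if (i + 1) % 2 == 0 and s[i] == 'R':
--             count += 1
--         if (i + 1) % 2 != 0 and s[i] == 'B':
--             count += 1
--     return count
-- ===== SOURCE B (Python) =====
-- def count_wrong_placed_balls(s: str) -> int:
--     # Partition by position parity with strided slices instead of an indexed loop:
--     # 1-indexed even positions (s[1::2]) should hold 'B', so each 'R' there is wrong;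
--     # 1-indexed odd positions (s[::2]) should hold 'R', so each 'B' there is wrong.
--     return s[1::2].count('R') + s[::2].count('B')
-- ===== Notes on version B (the rewrite author's own statement) =====
-- stated objective: faster
-- what changed: Replaces the indexed loop with per-index parity branches by two strided slices (s[1::2], s[::2]) whose wrong-coloured balls are counted directly with str.count.
import Mathlib
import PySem

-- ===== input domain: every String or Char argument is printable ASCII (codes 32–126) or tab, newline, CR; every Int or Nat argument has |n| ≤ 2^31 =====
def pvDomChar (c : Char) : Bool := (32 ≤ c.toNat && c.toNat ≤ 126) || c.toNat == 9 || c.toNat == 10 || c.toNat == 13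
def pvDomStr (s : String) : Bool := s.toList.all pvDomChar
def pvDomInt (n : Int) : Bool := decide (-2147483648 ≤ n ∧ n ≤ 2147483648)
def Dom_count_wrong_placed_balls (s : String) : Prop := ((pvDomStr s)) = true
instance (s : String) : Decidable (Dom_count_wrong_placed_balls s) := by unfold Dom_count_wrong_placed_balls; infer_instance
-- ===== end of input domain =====

-- B replaces A's single indexed loop with per-index parity branches by two step-2 slices (s[1::2], s[::2]) whose wrong-coloured balls are counted directly; same O(n) cost, simpler decomposition.


-- ===== PORT A =====
-- for i in range(len(s)): two parity-checked ifs on s[i] (i is always in range, so pyGetD is exact here)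
def count_wrong_placed_balls (s : String) : Int :=
  let cs := s.toList
  (PySem.List.pyRange 0 (PySem.List.len cs) 1).foldl
    (fun count i =>
      let count := if PySem.Int.mod (i + 1) 2 = 0 ∧ PySem.List.pyGetD cs i ' ' = 'R' then count + 1 else count
      let count := if PySem.Int.mod (i + 1) 2 ≠ 0 ∧ PySem.List.pyGetD cs i ' ' = 'B' then count + 1 else count
      count) 0

-- ===== PORT B =====
-- s[1::2].count('R') + s[::2].count('B'); the counted pattern is a single char, so str.count is List.count
def count_wrong_placed_balls_alt (s : String) : Int :=
  (((PySem.List.slice? s.toList (some 1) none 2).getD []).count 'R' : Int)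
  + (((PySem.List.slice? s.toList none none 2).getD []).count 'B' : Int)

-- ===== PRECONDITION & SPEC =====
def Spec_count_wrong_placed_balls (s : String) (out : Int) : Prop := out = count_wrong_placed_balls_alt s
instance (s : String) (out : Int) : Decidable (Spec_count_wrong_placed_balls s out) := by unfold Spec_count_wrong_placed_balls; infer_instance

-- ===== CLAIM (what is proved, stated in full; the proofs are below) =====
def Claim_equal_count_wrong_placed_balls : Prop := ∀ (s : String), Dom_count_wrong_placed_balls s → Spec_count_wrong_placed_balls s (count_wrong_placed_balls s)

-- ===== LEMMAS AND PROOFS =====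

-- elements at even / odd 0-based positions
mutual
def pvEvens {α : Type} : List α → List α
  | [] => []
  | c :: r => c :: pvOdds r
def pvOdds {α : Type} : List α → List α
  | [] => []
  | _ :: r => pvEvens r
end

-- closed forms of the two step-2 slices
lemma canonE {α : Type} (xs : List α) :
    PySem.List.slice? xs none none 2
      = some ((List.range ((xs.length + 1) / 2)).filterMap (fun k => xs[2 * k]?)) := by
  simp only [PySem.List.slice?, PySem.List.sliceIndices]
  norm_num
  have hcnt : (if 0 < xs.length then (((xs.length : Int) + 2 - 1) / 2).toNat else 0) = (xs.length + 1) / 2 := by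
    split <;> omega
  rw [hcnt]
  have hfun : (fun (x : Nat) => xs[(2 * (x : Int)).toNat]?) = fun k => xs[2 * k]? := by
    funext x
    have h : (2 * (x : Int)).toNat = 2 * x := by omega
    rw [h]
  rw [hfun]

lemma canonO {α : Type} (xs : List α) :
    PySem.List.slice? xs (some 1) none 2
      = some ((List.range (xs.length / 2)).filterMap (fun k => xs[2 * k + 1]?)) := by
  cases xs with
  | nil => simp [PySem.List.slice?, PySem.List.sliceIndices]
  | cons c r =>
    simp only [PySem.List.slice?, PySem.List.sliceIndices]
    norm_num
    have hcnt : (if 0 < r.length then (((r.length : Int) + 2 - 1) / 2).toNat else 0) = (r.length + 1) / 2 := by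
      split <;> omega
    rw [hcnt]
    have hfun : (fun (x : Nat) => (c :: r)[(1 + 2 * (x : Int)).toNat]?) = fun x => r[2 * x]? := by
      funext x
      have h : (1 + 2 * (x : Int)).toNat = 2 * x + 1 := by omega
      rw [h, List.getElem?_cons_succ]
    rw [hfun]

lemma parity_filterMap {α : Type} : ∀ (xs : List α),
    ((List.range ((xs.length + 1) / 2)).filterMap (fun k => xs[2 * k]?) = pvEvens xs)
    ∧ ((List.range (xs.length / 2)).filterMap (fun k => xs[2 * k + 1]?) = pvOdds xs) := by
  intro xs
  induction xs with
  | nil => simp [pvEvens, pvOdds]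
  | cons c r ih =>
    constructor
    · have hlen : ((c :: r).length + 1) / 2 = r.length / 2 + 1 := by simp [List.length_cons]; omega
      rw [hlen, List.range_succ_eq_map, List.filterMap_cons, List.filterMap_map]
      have hfun : ((fun k => (c :: r)[2 * k]?) ∘ (fun i => i + 1)) = fun k => r[2 * k + 1]? := by
        funext k
        show (c :: r)[2 * (k + 1)]? = r[2 * k + 1]?
        have h : 2 * (k + 1) = (2 * k + 1) + 1 := by omega
        rw [h, List.getElem?_cons_succ]
      rw [hfun, ih.2]
      simp [pvEvens]
    · have hlen : (c :: r).length / 2 = (r.length + 1) / 2 := by simp [List.length_cons]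
      rw [hlen]
      have hfun : (fun (k : Nat) => (c :: r)[2 * k + 1]?) = fun k => r[2 * k]? := by
        funext k; exact List.getElem?_cons_succ
      rw [hfun, ih.1]
      simp [pvOdds]

-- B's two slices are exactly the parity classes
lemma slice2_evens {α : Type} (xs : List α) :
    PySem.List.slice? xs none none 2 = some (pvEvens xs) := by
  rw [canonE, (parity_filterMap xs).1]

lemma slice2_odds {α : Type} (xs : List α) :
    PySem.List.slice? xs (some 1) none 2 = some (pvOdds xs) := by
  rw [canonO, (parity_filterMap xs).2]

-- A's accumulator characterised: b = true means the next character sits at a 1-indexed odd position (wants 'R', so counts a wrong 'B')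
def pvGoA : List Char → Bool → Int
  | [], _ => 0
  | c :: r, b => (if c = (if b then 'B' else 'R') then 1 else 0) + pvGoA r (!b)

lemma A_loop (cs : List Char) : ∀ (m acc : Int),
    (List.range cs.length).foldl
      (fun count (k : Nat) =>
        let count := if PySem.Int.mod (m + (k : Int) + 1) 2 = 0 ∧ PySem.List.pyGetD cs (k : Int) ' ' = 'R' then count + 1 else count
        let count := if PySem.Int.mod (m + (k : Int) + 1) 2 ≠ 0 ∧ PySem.List.pyGetD cs (k : Int) ' ' = 'B' then count + 1 else count
        count) acc
    = acc + pvGoA cs (decide (PySem.Int.mod m 2 = 0)) := by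
  induction cs with
  | nil => simp [pvGoA]
  | cons c r ih =>
    intro m acc
    rw [List.length_cons, List.range_succ_eq_map, List.foldl_cons, List.foldl_map]
    have hfun :
        (fun (count : Int) (k : Nat) =>
          let count := if PySem.Int.mod (m + ((k + 1 : Nat) : Int) + 1) 2 = 0 ∧ PySem.List.pyGetD (c :: r) ((k + 1 : Nat) : Int) ' ' = 'R' then count + 1 else count
          let count := if PySem.Int.mod (m + ((k + 1 : Nat) : Int) + 1) 2 ≠ 0 ∧ PySem.List.pyGetD (c :: r) ((k + 1 : Nat) : Int) ' ' = 'B' then count + 1 else count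
          count)
        = (fun (count : Int) (k : Nat) =>
          let count := if PySem.Int.mod ((m + 1) + (k : Int) + 1) 2 = 0 ∧ PySem.List.pyGetD r (k : Int) ' ' = 'R' then count + 1 else count
          let count := if PySem.Int.mod ((m + 1) + (k : Int) + 1) 2 ≠ 0 ∧ PySem.List.pyGetD r (k : Int) ' ' = 'B' then count + 1 else count
          count) := by
      funext count k
      have h1 : (m + ((k + 1 : Nat) : Int) + 1) = ((m + 1) + (k : Int) + 1) := by push_cast; ring
      have h2 : PySem.List.pyGetD (c :: r) ((k + 1 : Nat) : Int) ' ' = PySem.List.pyGetD r (k : Int) ' ' := by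
        rw [PySem.List.pyGetD_natCast, PySem.List.pyGetD_natCast]
        simp
      rw [h1, h2]
    rw [hfun, ih (m + 1)]
    have hm := PySem.Int.mod_eq_emod_of_pos (a := m) (b := 2) (by omega)
    have hm1 := PySem.Int.mod_eq_emod_of_pos (a := m + 1) (b := 2) (by omega)
    have hc0 : PySem.List.pyGetD (c :: r) ((0 : Nat) : Int) ' ' = c := by
      rw [PySem.List.pyGetD_natCast]; simp
    show (let c1 := if PySem.Int.mod (m + (0:Int) + 1) 2 = 0 ∧ PySem.List.pyGetD (c :: r) ((0:Nat) : Int) ' ' = 'R' then acc + 1 else acc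
          if PySem.Int.mod (m + (0:Int) + 1) 2 ≠ 0 ∧ PySem.List.pyGetD (c :: r) ((0:Nat) : Int) ' ' = 'B' then c1 + 1 else c1)
          + pvGoA r (decide (PySem.Int.mod (m + 1) 2 = 0))
        = acc + pvGoA (c :: r) (decide (PySem.Int.mod m 2 = 0))
    rw [hc0]
    by_cases hpar : m % 2 = 0
    · have e1 : PySem.Int.mod (m + 0 + 1) 2 = 1 := by rw [PySem.Int.mod_eq_emod_of_pos (by omega)]; omega
      have e2 : PySem.Int.mod m 2 = 0 := by rw [hm]; omega
      have e3 : PySem.Int.mod (m + 1) 2 = 1 := by rw [hm1]; omega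
      simp only [pvGoA, e1, e2, e3]
      by_cases hc : c = 'B' <;> simp [hc] <;> ring
    · have e1 : PySem.Int.mod (m + 0 + 1) 2 = 0 := by rw [PySem.Int.mod_eq_emod_of_pos (by omega)]; omega
      have e2 : PySem.Int.mod m 2 = 1 := by rw [hm]; omega
      have e3 : PySem.Int.mod (m + 1) 2 = 0 := by rw [hm1]; omega
      simp only [pvGoA, e1, e2, e3]
      by_cases hc : c = 'R' <;> simp [hc] <;> ring

lemma goA_counts : ∀ (cs : List Char),
    (pvGoA cs true = ((pvEvens cs).count 'B' : Int) + ((pvOdds cs).count 'R' : Int))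
    ∧ (pvGoA cs false = ((pvEvens cs).count 'R' : Int) + ((pvOdds cs).count 'B' : Int)) := by
  intro cs
  induction cs with
  | nil => simp [pvGoA, pvEvens, pvOdds]
  | cons c r ih =>
    constructor <;> simp [pvGoA, pvEvens, pvOdds, ih.1, ih.2, List.count_cons] <;>
      by_cases h : c = 'B' <;> by_cases h2 : c = 'R' <;> simp_all <;> ring

-- ===== VERDICT (by name: the statement is the Claim_ definition above) =====
theorem count_wrong_placed_balls_spec : Claim_equal_count_wrong_placed_balls := by
  intro s _
  unfold Spec_count_wrong_placed_balls count_wrong_placed_balls count_wrong_placed_balls_alt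
  rw [slice2_evens, slice2_odds]
  simp only [Option.getD_some]
  have hlen : PySem.List.len s.toList = ((s.toList.length : Nat) : Int) := by
    simp [PySem.List.len]
  rw [hlen, PySem.List.pyRange_zero_natCast, List.foldl_map]
  have := A_loop s.toList 0 0
  simp only [zero_add] at this ⊢
  rw [this]
  have h0 : decide (PySem.Int.mod 0 2 = 0) = true := by decide
  rw [h0, (goA_counts s.toList).1]
  ring
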